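-- pv_equiv track=rewrite | github.com/jaraco/jaraco.itertools | jaraco/itertools.py | every_other
-- ===== SOURCE A (Python) =====
-- def every_other(iterable):
--     """
--     Yield every other item from the iterable
--
--     >>> ' '.join(every_other('abcdefg'))
--     'a c e g'
--     """
--     items = iter(iterable)
--     while True:
--         try:
--             yield next(items)
--             next(items)
--         except StopIteration:
--             return
-- ===== SOURCE B (Python) =====
-- def every_other(iterable):
--     """Yield every other item from the iterable (even indices) via enumerate."""
--     for i, item in enumerate(iterable):
--         if i % 2 == 0:
--             yield item
-- ===== Notes on version B (the rewrite author's own statement) =====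
-- stated objective: simpler
-- what changed: Replaces the pair-consuming next()/next() loop with try/except StopIteration by a single enumerate loop that yields only even-index items.
import Mathlib
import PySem

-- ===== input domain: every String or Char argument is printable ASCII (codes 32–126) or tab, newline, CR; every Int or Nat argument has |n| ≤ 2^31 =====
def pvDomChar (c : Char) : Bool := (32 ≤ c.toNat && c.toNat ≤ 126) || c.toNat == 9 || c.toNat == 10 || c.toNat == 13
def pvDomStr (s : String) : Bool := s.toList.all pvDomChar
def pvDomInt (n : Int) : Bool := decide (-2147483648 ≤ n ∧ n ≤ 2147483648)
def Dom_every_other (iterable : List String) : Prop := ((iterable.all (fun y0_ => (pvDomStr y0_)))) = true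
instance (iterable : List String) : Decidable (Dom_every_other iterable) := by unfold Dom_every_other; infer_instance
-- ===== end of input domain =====

-- B replaces A's pair-consuming next()/next() loop (try/except StopIteration) by a
-- single enumerate loop yielding only even-index items; objective: simpler.

-- ===== PORT A =====
-- A consumes two items per iteration: yields the first, discards the second;
-- StopIteration at either next() ends the generator.
def every_other : List String → List String
  | [] => []
  | [x] => [x]
  | x :: _ :: rest => x :: every_other rest

-- ===== PORT B =====
-- B: enumerate with index i, yield when i % 2 == 0.
def every_other_alt_go (i : Nat) : List String → List String
  | [] => []
  | x :: rest =>
      if i % 2 == 0 then x :: every_other_alt_go (i + 1) rest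
      else every_other_alt_go (i + 1) rest

def every_other_alt (iterable : List String) : List String :=
  every_other_alt_go 0 iterable

-- ===== PRECONDITION & SPEC =====
def Spec_every_other (iterable : List String) (out : List String) : Prop := out = every_other_alt iterable
instance (iterable : List String) (out : List String) : Decidable (Spec_every_other iterable out) := by unfold Spec_every_other; infer_instance

-- ===== CLAIM =====
def Claim_equal_every_other : Prop := ∀ (iterable : List String), Dom_every_other iterable → Spec_every_other iterable (every_other iterable)

-- ===== LEMMAS AND PROOFS =====
theorem every_other_alt_go_mod (xs : List String) : ∀ (i j : Nat), i % 2 = j % 2 →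
    every_other_alt_go i xs = every_other_alt_go j xs := by
  induction xs with
  | nil => intro i j _; rfl
  | cons x rest ih =>
      intro i j h
      simp only [every_other_alt_go, h]
      have h' : (i + 1) % 2 = (j + 1) % 2 := by omega
      rw [ih (i + 1) (j + 1) h']

theorem every_other_eq_alt : ∀ (xs : List String), every_other xs = every_other_alt xs := by
  intro xs
  unfold every_other_alt
  induction xs using every_other.induct with
  | case1 => rfl
  | case2 x => rfl
  | case3 x y rest ih =>
      have step : every_other_alt_go 0 (x :: y :: rest) = x :: every_other_alt_go 0 rest := by
        show (if (0 % 2 == 0) = true then x :: every_other_alt_go 1 (y :: rest)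
              else every_other_alt_go 1 (y :: rest)) = _
        simp only [Nat.zero_mod, beq_self_eq_true, if_true]
        show x :: (if ((1 : Nat) % 2 == 0) = true then y :: every_other_alt_go 2 rest
              else every_other_alt_go 2 rest) = _
        norm_num
        exact every_other_alt_go_mod rest 2 0 (by omega)
      rw [step, every_other, ih]

-- ===== VERDICT =====
theorem every_other_spec : Claim_equal_every_other := by
  intro xs _
  unfold Spec_every_other
  exact every_other_eq_alt xs
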